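-- pv_equiv track=rewrite | github.com/LLLZeSheng/AscendC-copliot | tools/detector/add_markers.py | prev_nonempty_line_start
-- ===== SOURCE A (Python) =====
-- from typing import List, Optional, Tuple
--
-- def line_end(src: str, pos: int) -> int:
--     """End index (exclusive) of the line containing pos."""
--     j = src.find("\n", pos)
--     return len(src) if j == -1 else j + 1
--
-- def _prev_line_start(src: str, cur_line_start: int) -> Optional[int]:
--     """Start index of previous line (may be empty), given current line start."""
--     if cur_line_start <= 0:
--         return None
--     j = src.rfind("\n", 0, cur_line_start - 1)
--     return 0 if j == -1 else j + 1
--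
-- def prev_nonempty_line_start(src: str, cur_line_start: int) -> Optional[int]:
--     """Start index of previous non-empty line (skips blank/whitespace-only lines)."""
--     ls = _prev_line_start(src, cur_line_start)
--     while ls is not None:
--         le = line_end(src, ls)
--         if src[ls:le].strip() != "":
--             return ls
--         ls = _prev_line_start(src, ls)
--     return None
-- ===== SOURCE B (Python) =====
-- def prev_nonempty_line_start(src, cur_line_start):
--     """Start index of previous non-empty line (skips blank/whitespace-only lines)."""
--     starts = [0] + [i + 1 for i, c in enumerate(src) if c == "\n"]
--     for p in reversed(starts):
--         if p < cur_line_start: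
--             e = src.find("\n", p)
--             e = len(src) if e == -1 else e + 1
--             if src[p:e].strip() != "":
--                 return p
--     return None
-- ===== Notes on version B (the rewrite author's own statement) =====
-- stated objective: alternative
-- what changed: Instead of repeatedly calling rfind to hop backwards line by line, B builds the list of all line-start positions in one pass over the string and scans it in reverse for the first start below cur_line_start whose full line is non-blank.
import Mathlib
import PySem

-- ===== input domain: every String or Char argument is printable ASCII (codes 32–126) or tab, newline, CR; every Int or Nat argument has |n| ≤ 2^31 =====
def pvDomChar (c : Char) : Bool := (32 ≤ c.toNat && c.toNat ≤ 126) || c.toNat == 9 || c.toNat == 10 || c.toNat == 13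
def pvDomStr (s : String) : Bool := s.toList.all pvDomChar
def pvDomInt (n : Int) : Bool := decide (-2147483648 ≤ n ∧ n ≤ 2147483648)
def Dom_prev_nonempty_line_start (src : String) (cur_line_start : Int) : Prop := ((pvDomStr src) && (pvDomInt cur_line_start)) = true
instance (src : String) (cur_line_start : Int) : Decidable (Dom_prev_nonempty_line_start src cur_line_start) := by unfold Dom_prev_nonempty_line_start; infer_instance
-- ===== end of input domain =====

-- ===== PORT A =====
-- Header: B builds all line starts in one pass and scans them in reverse, instead of A's
-- repeated rfind back-hops; return values proved equal on all inputs (no mutation involved).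

-- helper line_end
def pvLineEnd (src : String) (pos : Int) : Int :=
  let j := PySem.Str.findFrom src "\n" pos
  if j = -1 then PySem.Str.len src else j + 1

-- helper _prev_line_start
def pvPrevLineStart (src : String) (cur_line_start : Int) : Option Int :=
  if cur_line_start ≤ 0 then none
  else
    let j := PySem.Str.rfindFrom src "\n" 0 (some (cur_line_start - 1))
    some (if j = -1 then 0 else j + 1)

-- the while loop; the Nat argument is a fuel/totality guard only (proved sufficient below)
def pvLoopA (src : String) : Nat → Option Int → Option Int
  | _, none => none
  | 0, some _ => none
  | fuel + 1, some ls =>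
    if PySem.Str.strip (PySem.Str.slice src (some ls) (some (pvLineEnd src ls))) ≠ "" then some ls
    else pvLoopA src fuel (pvPrevLineStart src ls)

def prev_nonempty_line_start (src : String) (cur_line_start : Int) : Option Int :=
  pvLoopA src (src.toList.length + 1) (pvPrevLineStart src cur_line_start)

-- ===== PORT B =====
def prev_nonempty_line_start_alt (src : String) (cur_line_start : Int) : Option Int :=
  let starts : List Int :=
    0 :: (PySem.List.enumerate src.toList).filterMap
      (fun ic => if ic.2 = '\n' then some (ic.1 + 1) else none)
  starts.reverse.find? fun p =>
    decide (p < cur_line_start) &&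
    (let e := PySem.Str.findFrom src "\n" p
     let e2 := if e = -1 then PySem.Str.len src else e + 1
     decide (PySem.Str.strip (PySem.Str.slice src (some p) (some e2)) ≠ ""))

-- ===== PRECONDITION & SPEC =====
def Spec_prev_nonempty_line_start (src : String) (cur_line_start : Int) (out : Option Int) : Prop := out = prev_nonempty_line_start_alt src cur_line_start
instance (src : String) (cur_line_start : Int) (out : Option Int) : Decidable (Spec_prev_nonempty_line_start src cur_line_start out) := by unfold Spec_prev_nonempty_line_start; infer_instance

-- ===== CLAIM (what is proved, stated in full; the proofs are below) =====
def Claim_equal_prev_nonempty_line_start : Prop := ∀ (src : String) (cur_line_start : Int), Dom_prev_nonempty_line_start src cur_line_start → Spec_prev_nonempty_line_start src cur_line_start (prev_nonempty_line_start src cur_line_start)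

-- ===== LEMMAS AND PROOFS =====

-- newline positions of cs strictly below m, ascending, as Ints
def pvNL (cs : List Char) (m : Nat) : List Int :=
  (List.range m).filterMap (fun j => if cs[j]? = some '\n' then some ((j : Nat) : Int) else none)

-- all line start positions, ascending
def pvStarts (cs : List Char) : List Int := 0 :: (pvNL cs cs.length).map (· + 1)

-- "the line starting at p is non-blank"
def pvG (src : String) (p : Int) : Bool :=
  decide (PySem.Str.strip (PySem.Str.slice src (some p) (some (pvLineEnd src p))) ≠ "")

-- line starts below cur
def pvF (src : String) (cur : Int) : List Int :=
  (pvStarts src.toList).filter (fun p => decide (p < cur))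

theorem pvNL_succ (cs : List Char) (m : Nat) :
    pvNL cs (m + 1) = pvNL cs m ++ (if cs[m]? = some '\n' then [((m : Nat) : Int)] else []) := by
  simp only [pvNL, List.range_succ, List.filterMap_append, List.filterMap_cons, List.filterMap_nil]
  by_cases h : cs[m]? = some '\n' <;> simp [h]

theorem pvNL_nonneg (cs : List Char) (m : Nat) : ∀ x ∈ pvNL cs m, 0 ≤ x := by
  intro x hx
  simp only [pvNL, List.mem_filterMap] at hx
  obtain ⟨j, _, hj⟩ := hx
  split at hj
  · cases hj; positivity
  · cases hj

theorem pvNL_length (cs : List Char) (m : Nat) : (pvNL cs m).length ≤ m := by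
  calc (pvNL cs m).length ≤ (List.range m).length := List.length_filterMap_le _ _
  _ = m := List.length_range

theorem pvPrefix (t : List Char) : (['\n'].isPrefixOf t = true) ↔ t[0]? = some '\n' := by
  cases t with
  | nil => exact ⟨fun h => by simp [List.isPrefixOf] at h, fun h => by simp at h⟩
  | cons a s =>
    show (('\n' == a) && List.isPrefixOf [] s) = true ↔ _
    rw [show List.isPrefixOf ([] : List Char) s = true from rfl, Bool.and_true]
    constructor
    · intro h; simpa using (beq_iff_eq.mp h).symm
    · intro h; exact beq_iff_eq.mpr (by simpa using h.symm)

theorem pvGo (t : List Char) (k : Nat) :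
    PySem.Chars.rfind.go t ['\n'] k = ((pvNL t (k + 1)).getLast?).getD (-1) := by
  induction k with
  | zero =>
    rw [show PySem.Chars.rfind.go t ['\n'] 0 = if ['\n'].isPrefixOf t then (0 : Int) else -1 from rfl]
    have h0 : pvNL t 1 = if t[0]? = some '\n' then [((0 : Nat) : Int)] else [] := by
      simpa [show pvNL t 0 = [] from rfl] using pvNL_succ t 0
    by_cases h : t[0]? = some '\n'
    · rw [if_pos ((pvPrefix t).mpr h)]; simp [h0, h]
    · rw [if_neg (fun hh => h ((pvPrefix t).mp hh))]; simp [h0, h]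
  | succ k ih =>
    rw [show PySem.Chars.rfind.go t ['\n'] (k + 1)
        = if ['\n'].isPrefixOf (t.drop (k + 1)) then (((k + 1 : Nat)) : Int)
          else PySem.Chars.rfind.go t ['\n'] k from rfl, ih, pvNL_succ t (k + 1)]
    have hd : (t.drop (k + 1))[0]? = t[k + 1]? := by
      rw [List.getElem?_drop]
    by_cases h : t[k + 1]? = some '\n'
    · rw [if_pos ((pvPrefix _).mpr (hd.trans h))]; simp [h]
    · rw [if_neg (fun hh => h (hd.symm.trans ((pvPrefix _).mp hh)))]; simp [h]

theorem pvNL_take (cs : List Char) (e' m : Nat) (h : m ≤ e') :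
    pvNL (List.take e' cs) m = pvNL cs m := by
  unfold pvNL
  refine List.filterMap_congr (fun j hj => ?_)
  have hj' : j < m := List.mem_range.mp hj
  rw [List.getElem?_take, if_pos (show j < e' by omega)]

theorem pvRfindTake (cs : List Char) (e' : Nat) (he : e' ≤ cs.length) :
    PySem.Chars.rfind (List.take e' cs) ['\n'] = ((pvNL cs e').getLast?).getD (-1) := by
  have hlen : (List.take e' cs).length = e' := by
    rw [List.length_take, Nat.min_eq_left he]
  rw [show PySem.Chars.rfind (List.take e' cs) ['\n']
      = PySem.Chars.rfind.go (List.take e' cs) ['\n'] (List.take e' cs).length from rfl,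
    hlen, pvGo, pvNL_succ, List.getElem?_take, if_neg (lt_irrefl e'), pvNL_take cs e' e' le_rfl]
  simp

theorem pvNL_filter (cs : List Char) (m : Nat) (q : Int) (hq : 0 ≤ q) :
    (pvNL cs m).filter (fun j => decide (j < q)) = pvNL cs (min m q.toNat) := by
  induction m with
  | zero => simp [pvNL]
  | succ m ih =>
    rw [pvNL_succ, List.filter_append, ih]
    by_cases hm : m < q.toNat
    · have hmin1 : min (m + 1) q.toNat = (min m q.toNat) + 1 := by omega
      have hmin2 : min m q.toNat = m := by omega
      rw [hmin1, pvNL_succ, hmin2]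
      congr 1
      split
      · simp
        omega
      · simp
    · have hmin1 : min (m + 1) q.toNat = min m q.toNat := by omega
      rw [hmin1]
      have : ¬ ((m : Int) < q) := by omega
      split <;> simp [this]

theorem pvStarts_nonneg (cs : List Char) : ∀ p ∈ pvStarts cs, 0 ≤ p := by
  intro p hp
  simp only [pvStarts, List.mem_cons, List.mem_map] at hp
  rcases hp with h | ⟨j, hj, rfl⟩
  · omega
  · have := pvNL_nonneg cs cs.length j hj; omega

theorem pvStarts_pairwise (cs : List Char) : (pvStarts cs).Pairwise (· < ·) := by
  have hNL : (pvNL cs cs.length).Pairwise (· < ·) := by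
    rw [pvNL, List.pairwise_filterMap]
    refine List.Pairwise.imp ?_ (List.pairwise_lt_range)
    intro a b hab x hx y hy
    split at hx <;> cases hx
    split at hy <;> cases hy
    exact_mod_cast hab
  rw [pvStarts, List.pairwise_cons]
  constructor
  · intro p hp
    simp only [List.mem_map] at hp
    obtain ⟨j, hj, rfl⟩ := hp
    have := pvNL_nonneg cs cs.length j hj; omega
  · exact List.Pairwise.map _ (fun h => by omega) hNL

theorem pvPrevChar (src : String) (cur : Int) (hc : 0 < cur) :
    pvPrevLineStart src cur = (pvF src cur).getLast? := by
  have hns : ("\n" : String).toList = ['\n'] := rfl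
  have hkey : PySem.Str.rfindFrom src "\n" 0 (some (cur - 1))
      = ((pvNL src.toList (min src.toList.length (cur - 1).toNat)).getLast?).getD (-1) := by
    rw [PySem.Str.rfindFrom_eq, hns]
    simp only [PySem.Chars.rfindFrom]
    rw [if_neg (show ¬ ((0:Int) < 0) by omega)]
    by_cases hb : (src.toList.length : Int) < cur - 1
    · rw [if_pos hb, if_neg (show ¬ ((src.toList.length : Int) < 0) by omega),
        show ((src.toList.length : Int)).toNat = src.toList.length from by omega,
        show (0 : Int).toNat = 0 from rfl, List.drop_zero,
        pvRfindTake _ _ le_rfl,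
        show min src.toList.length (cur - 1).toNat = src.toList.length from by omega]
      cases hL : (pvNL src.toList src.toList.length).getLast? with
      | none => simp
      | some v =>
        have hv : 0 ≤ v := pvNL_nonneg _ _ v (List.mem_of_getLast? hL)
        simp [if_neg (show ¬ v = -1 by omega)]
    · rw [if_neg hb, if_neg (show ¬ (cur - 1 < 0) by omega),
        if_neg (show ¬ (cur - 1 < 0) by omega),
        show (0 : Int).toNat = 0 from rfl, List.drop_zero,
        pvRfindTake _ _ (show (cur - 1).toNat ≤ src.toList.length by omega),
        show min src.toList.length (cur - 1).toNat = (cur - 1).toNat from by omega]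
      cases hL : (pvNL src.toList (cur - 1).toNat).getLast? with
      | none => simp
      | some v =>
        have hv : 0 ≤ v := pvNL_nonneg _ _ v (List.mem_of_getLast? hL)
        simp [if_neg (show ¬ v = -1 by omega)]
  have hF : pvF src cur
      = 0 :: (pvNL src.toList (min src.toList.length (cur - 1).toNat)).map (· + 1) := by
    rw [pvF, pvStarts, List.filter_cons_of_pos (by simpa using hc), List.filter_map]
    congr 1
    have hcomp : ((fun p => decide (p < cur)) ∘ (· + (1 : Int)))
        = (fun j : Int => decide (j < cur - 1)) := by
      funext j
      show decide (j + 1 < cur) = decide (j < cur - 1)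
      exact decide_eq_decide.mpr (by omega)
    rw [hcomp]
    rw [pvNL_filter src.toList src.toList.length (cur - 1) (by omega)]
  rw [pvPrevLineStart, if_neg (show ¬ cur ≤ 0 by omega), hkey, hF]
  cases hL : (pvNL src.toList (min src.toList.length (cur - 1).toNat)).getLast? with
  | none =>
    rw [List.getLast?_eq_none_iff] at hL
    rw [hL]
    simp
  | some v =>
    have hv : 0 ≤ v := pvNL_nonneg _ _ v (List.mem_of_getLast? hL)
    rw [show (0 :: (pvNL src.toList (min src.toList.length (cur - 1).toNat)).map (· + 1))
        = [0] ++ (pvNL src.toList (min src.toList.length (cur - 1).toNat)).map (· + 1) from rfl,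
      List.getLast?_append, List.getLast?_map, hL]
    simp [if_neg (show ¬ v = -1 by omega)]

theorem pvFilterLast (l : List Int) (hp : l.Pairwise (· < ·)) :
    ∀ (q : Int) (ys : List Int) (m : Int), l.filter (fun p => decide (p < q)) = ys ++ [m] →
      l.filter (fun p => decide (p < m)) = ys := by
  induction l with
  | nil => intro q ys m h; simp at h
  | cons a t ih =>
    intro q ys m h
    rw [List.pairwise_cons] at hp
    obtain ⟨ha, hpt⟩ := hp
    by_cases haq : a < q
    · rw [List.filter_cons_of_pos (by simpa using haq)] at h
      cases ys with
      | nil =>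
        simp only [List.nil_append, List.cons.injEq] at h
        obtain ⟨rfl, hte⟩ := h
        rw [List.filter_cons_of_neg (by simp), List.filter_eq_nil_iff]
        intro b hb hbm
        have hbq : b < q := lt_trans (by simpa using hbm) haq
        have : b ∈ t.filter (fun p => decide (p < q)) := List.mem_filter.2 ⟨hb, by simpa using hbq⟩
        rw [hte] at this; simp at this
      | cons y ys' =>
        simp only [List.cons_append, List.cons.injEq] at h
        obtain ⟨rfl, hte⟩ := h
        have hm : m ∈ t := by
          have : m ∈ t.filter (fun p => decide (p < q)) := by rw [hte]; simp
          exact List.mem_of_mem_filter this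
        rw [List.filter_cons_of_pos (by simpa using ha m hm), ih hpt q ys' m hte]
    · rw [List.filter_cons_of_neg (by simpa using haq)] at h
      have hm : m ∈ t.filter (fun p => decide (p < q)) := by rw [h]; simp
      have h1 := ha m (List.mem_of_mem_filter hm)
      have h2 : m < q := by have := List.of_mem_filter hm; simpa using this
      omega

theorem pvF_cons (src : String) (cur : Int) (hc : 0 < cur) :
    ∃ t, pvF src cur = 0 :: t := by
  exact ⟨_, by rw [pvF, pvStarts, List.filter_cons_of_pos (by simpa using hc)]⟩

theorem pvLoopA_none (src : String) (fuel : Nat) : pvLoopA src fuel none = none := by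
  cases fuel <;> rfl

theorem pvLoop (src : String) : ∀ (fuel : Nat) (cur : Int), 0 < cur →
    (pvF src cur).length ≤ fuel →
    pvLoopA src fuel (pvPrevLineStart src cur) = (pvF src cur).reverse.find? (pvG src) := by
  intro fuel
  induction fuel with
  | zero =>
    intro cur hc hlen
    obtain ⟨t, ht⟩ := pvF_cons src cur hc
    rw [ht] at hlen; simp at hlen
  | succ fuel ih =>
    intro cur hc hlen
    rcases List.eq_nil_or_concat (pvF src cur) with hnil | ⟨ys, m, hconcat⟩
    · obtain ⟨t, ht⟩ := pvF_cons src cur hc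
      rw [ht] at hnil; simp at hnil
    · rw [List.concat_eq_append] at hconcat
      rw [pvPrevChar src cur hc, hconcat, List.getLast?_concat]
      have hmS : m ∈ pvStarts src.toList := by
        have : m ∈ pvF src cur := by rw [hconcat]; simp
        exact List.mem_of_mem_filter this
      have hm0 : 0 ≤ m := pvStarts_nonneg _ m hmS
      have hys : (pvStarts src.toList).filter (fun p => decide (p < m)) = ys :=
        pvFilterLast _ (pvStarts_pairwise _) cur ys m hconcat
      rw [show pvLoopA src (fuel + 1) (some m)
          = if PySem.Str.strip (PySem.Str.slice src (some m) (some (pvLineEnd src m))) ≠ ""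
            then some m
            else pvLoopA src fuel (pvPrevLineStart src m) from rfl]
      rw [List.reverse_concat, List.find?_cons]
      by_cases hg : PySem.Str.strip (PySem.Str.slice src (some m) (some (pvLineEnd src m))) ≠ ""
      · rw [if_pos hg, show pvG src m = true from decide_eq_true hg]
      · rw [if_neg hg, show pvG src m = false from decide_eq_false hg]
        by_cases hm : 0 < m
        · have hFm : pvF src m = ys := hys
          have hlen' : (pvF src m).length ≤ fuel := by
            rw [hFm]
            have : (ys ++ [m]).length ≤ fuel + 1 := hconcat ▸ hlen
            simp at this; omega
          rw [ih m hm hlen', hFm]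
        · have hm' : m = 0 := by omega
          subst hm'
          rw [show pvPrevLineStart src 0 = none from rfl, pvLoopA_none]
          have hys0 : ys = [] := by
            rw [← hys, List.filter_eq_nil_iff]
            intro p hp hlt
            have := pvStarts_nonneg _ p hp
            simp at hlt; omega
          rw [hys0]; rfl

theorem pvAltBridge (src : String) (cur : Int) :
    prev_nonempty_line_start_alt src cur = (pvF src cur).reverse.find? (pvG src) := by
  have hstarts : (0 : Int) :: (PySem.List.enumerate src.toList).filterMap
      (fun ic => if ic.2 = '\n' then some (ic.1 + 1) else none) = pvStarts src.toList := by
    rw [pvStarts]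
    congr 1
    rw [PySem.List.enumerate_eq_map_pyRange src.toList ' ', List.filterMap_map,
      PySem.List.len_eq, PySem.List.pyRange_zero_nat, List.filterMap_map, pvNL,
      List.map_filterMap]
    refine List.filterMap_congr (fun j hj => ?_)
    have hj' : j < src.toList.length := List.mem_range.mp hj
    simp only [Function.comp, PySem.List.pyGetD_natCast, List.getD_eq_getElem?_getD,
      List.getElem?_eq_getElem hj']
    by_cases h : src.toList[j] = '\n' <;> simp [h]
  have hpred : (fun (p : Int) => decide (p < cur) &&
      (let e := PySem.Str.findFrom src "\n" p
       let e2 := if e = -1 then PySem.Str.len src else e + 1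
       decide (PySem.Str.strip (PySem.Str.slice src (some p) (some e2)) ≠ "")))
      = (fun p => decide (p < cur) && pvG src p) := by
    funext p
    rfl
  have hfun : (fun (a : Int) => decide ((fun p => decide (p < cur)) a = true ∧ pvG src a = true))
      = (fun p => decide (p < cur) && pvG src p) := by
    funext a
    by_cases h1 : a < cur <;> by_cases h2 : pvG src a = true <;> simp [h1, h2]
  rw [prev_nonempty_line_start_alt]
  simp only [hstarts, hpred]
  rw [pvF, ← List.filter_reverse, List.find?_filter, hfun]

theorem pvF_length (src : String) (cur : Int) :
    (pvF src cur).length ≤ src.toList.length + 1 := by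
  calc (pvF src cur).length ≤ (pvStarts src.toList).length := List.length_filter_le _ _
  _ = (pvNL src.toList src.toList.length).length + 1 := by simp [pvStarts]
  _ ≤ src.toList.length + 1 := by have := pvNL_length src.toList src.toList.length; omega

-- ===== VERDICT (by name: the statement is the Claim_ definition above) =====
theorem prev_nonempty_line_start_spec : Claim_equal_prev_nonempty_line_start := by
  intro src cur _
  unfold Spec_prev_nonempty_line_start
  rw [pvAltBridge, prev_nonempty_line_start]
  by_cases hc : 0 < cur
  · exact pvLoop src (src.toList.length + 1) cur hc (pvF_length src cur)
  · have hF : pvF src cur = [] := by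
      rw [pvF, List.filter_eq_nil_iff]
      intro p hp hlt
      have := pvStarts_nonneg _ p hp
      simp at hlt; omega
    rw [pvPrevLineStart, if_pos (by omega), pvLoopA_none, hF]
    rfl
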